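-- pv_equiv track=rewrite | github.com/super0xie/Solution | Python/NumberofValidSubarrays.py | validSubarrays
-- ===== SOURCE A (Python) =====
-- from typing import List
--
-- def validSubarrays(nums: List[int]) -> int:
--     res = 0
--     for i in range(len(nums)):
--         j = i+1
--         while j < len(nums):
--             if nums[j] < nums[i]:
--                 break
--             j += 1
--         res += j-i
--     return res
-- ===== SOURCE B (Python) =====
-- def validSubarrays(nums):
--     res = 0
--     stack = []
--     for j in range(len(nums)):
--         x = nums[j]
--         while stack and nums[stack[-1]] > x:
--             stack.pop()
--         stack.append(j)
--         res += len(stack)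
--     return res
-- ===== Notes on version B (the rewrite author's own statement) =====
-- stated objective: faster
-- what changed: Replaces the per-start inner scan for the next strictly smaller element with a single pass keeping a monotonic stack of still-valid subarray starts and adding its size at each position.
import Mathlib
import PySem

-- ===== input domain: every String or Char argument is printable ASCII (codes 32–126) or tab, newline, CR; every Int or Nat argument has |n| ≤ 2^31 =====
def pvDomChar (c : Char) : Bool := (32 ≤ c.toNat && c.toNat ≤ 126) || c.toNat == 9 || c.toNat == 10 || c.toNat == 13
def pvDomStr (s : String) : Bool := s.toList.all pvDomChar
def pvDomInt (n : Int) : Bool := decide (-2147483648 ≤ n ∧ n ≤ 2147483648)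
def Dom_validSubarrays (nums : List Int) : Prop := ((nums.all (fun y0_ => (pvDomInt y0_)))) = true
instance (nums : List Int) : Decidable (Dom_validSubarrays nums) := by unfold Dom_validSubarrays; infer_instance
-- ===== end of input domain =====

-- B replaces A's per-start inner scan with a one-pass monotonic stack; return values proved equal.

-- ===== PORT A =====
-- A's inner while loop: advance j while j < len(nums) and not nums[j] < nums[i].
-- All indices used are nonnegative and in range, so List.getD is exact for Python's nums[k].
def innerA (nums : List Int) (i j : Nat) : Nat :=
  if j < nums.length then
    if nums.getD j 0 < nums.getD i 0 then j
    else innerA nums i (j + 1)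
  else j
termination_by nums.length - j
decreasing_by omega

def validSubarrays (nums : List Int) : Int :=
  (List.range nums.length).foldl
    (fun res i => res + ((innerA nums i (i + 1) : Int) - (i : Int))) 0

-- ===== PORT B =====
-- Source B's 'while stack and nums[stack[-1]] > x: stack.pop()'; the stack top is kept at the head.
def popWhileB (nums : List Int) (x : Int) : List Nat → List Nat
  | [] => []
  | t :: rest => if x < nums.getD t 0 then popWhileB nums x rest else t :: rest

def validSubarrays_alt (nums : List Int) : Int :=
  ((List.range nums.length).foldl
    (fun (st : Int × List Nat) j =>
      let s := j :: popWhileB nums (nums.getD j 0) st.2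
      (st.1 + (s.length : Int), s))
    (0, [])).1

-- ===== PRECONDITION & SPEC =====
def Spec_validSubarrays (nums : List Int) (out : Int) : Prop := out = validSubarrays_alt nums
instance (nums : List Int) (out : Int) : Decidable (Spec_validSubarrays nums out) := by unfold Spec_validSubarrays; infer_instance

-- ===== CLAIM (what is proved, stated in full; the proofs are below) =====
def Claim_equal_validSubarrays : Prop := ∀ (nums : List Int), Dom_validSubarrays nums → Spec_validSubarrays nums (validSubarrays nums)

-- ===== LEMMAS AND PROOFS =====

-- aliveB nums i j: every k with i < k ≤ j has nums[i] ≤ nums[k]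
def aliveB (nums : List Int) (i : Nat) : Nat → Bool
  | 0 => true
  | j + 1 => if j + 1 ≤ i then true else (aliveB nums i j && decide (nums.getD i 0 ≤ nums.getD (j + 1) 0))

theorem aliveB_of_le (nums : List Int) (i j : Nat) (h : j ≤ i) : aliveB nums i j = true := by
  cases j with
  | zero => rfl
  | succ j => simp [aliveB, h]

theorem aliveB_iff (nums : List Int) (i j : Nat) :
    aliveB nums i j = true ↔ ∀ k, i < k → k ≤ j → nums.getD i 0 ≤ nums.getD k 0 := by
  induction j with
  | zero =>
    simp [aliveB]
    intro k hk hk0; omega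
  | succ j ih =>
    by_cases h : j + 1 ≤ i
    · simp [aliveB, h]
      intro k hk hk'; omega
    · simp [aliveB, h, ih]
      constructor
      · rintro ⟨h1, h2⟩ k hk hk'
        rcases Nat.lt_or_ge k (j + 1) with hc | hc
        · exact h1 k hk (by omega)
        · have hkk : k = j + 1 := by omega
          simpa [hkk] using h2
      · intro hall
        exact ⟨fun k hk hk' => hall k hk (by omega), hall (j + 1) (by omega) le_rfl⟩

theorem aliveB_succ_of_lt (nums : List Int) (i m : Nat) (h : i < m) :
    aliveB nums i m = (aliveB nums i (m - 1) && decide (nums.getD i 0 ≤ nums.getD m 0)) := by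
  cases m with
  | zero => omega
  | succ j =>
    have : ¬ (j + 1 ≤ i) := by omega
    simp [aliveB, this]

theorem foldl_add_range (f : Nat → Int) (n : Nat) (c : Int) :
    (List.range n).foldl (fun r i => r + f i) c = c + ∑ i ∈ Finset.range n, f i := by
  induction n generalizing c with
  | zero => simp
  | succ n ih =>
    rw [List.range_succ, List.foldl_append, ih, Finset.sum_range_succ]
    simp [add_assoc]

theorem sum_ite_split (n a : Nat) (p : Nat → Bool) (ha : a < n) (hpa : p a = true) :
    ∑ j ∈ Finset.range n, (if a ≤ j ∧ p j = true then (1 : Int) else 0)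
      = 1 + ∑ j ∈ Finset.range n, (if a + 1 ≤ j ∧ p j = true then (1 : Int) else 0) := by
  have hsplit : ∀ j ∈ Finset.range n,
      (if a ≤ j ∧ p j = true then (1 : Int) else 0)
        = (if a + 1 ≤ j ∧ p j = true then (1 : Int) else 0) + (if j = a then 1 else 0) := by
    intro j _
    by_cases hj : j = a
    · subst hj; simp [hpa]
    · by_cases hp : p j = true <;> by_cases hle : a ≤ j <;> simp_all <;> omega
  rw [Finset.sum_congr rfl hsplit, Finset.sum_add_distrib,
    Finset.sum_ite_eq' (Finset.range n) a (fun _ => (1 : Int))]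
  simp [ha, add_comm]

theorem innerA_eq (nums : List Int) (i : Nat) :
    ∀ (d j0 : Nat), nums.length - j0 ≤ d → i < j0 →
    (∀ k, i < k → k < j0 → nums.getD i 0 ≤ nums.getD k 0) →
    (innerA nums i j0 : Int)
      = j0 + ∑ j ∈ Finset.range nums.length,
          (if j0 ≤ j ∧ aliveB nums i j = true then (1 : Int) else 0) := by
  intro d
  induction d with
  | zero =>
    intro j0 hd hij H
    have hn : ¬ j0 < nums.length := by omega
    rw [innerA, if_neg hn]
    have hz : ∀ j ∈ Finset.range nums.length,
        (if j0 ≤ j ∧ aliveB nums i j = true then (1 : Int) else 0) = 0 := by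
      intro j hj
      rw [Finset.mem_range] at hj
      have : ¬ (j0 ≤ j ∧ aliveB nums i j = true) := by rintro ⟨h1, _⟩; omega
      simp [this]
    rw [Finset.sum_congr rfl hz]; simp
  | succ d ih =>
    intro j0 hd hij H
    rw [innerA]
    by_cases hn : j0 < nums.length
    · rw [if_pos hn]
      by_cases hb : nums.getD j0 0 < nums.getD i 0
      · rw [if_pos hb]
        have hz : ∀ j ∈ Finset.range nums.length,
            (if j0 ≤ j ∧ aliveB nums i j = true then (1 : Int) else 0) = 0 := by
          intro j hj
          have : ¬ (j0 ≤ j ∧ aliveB nums i j = true) := by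
            rintro ⟨h1, h2⟩
            have := (aliveB_iff nums i j).mp h2 j0 hij h1
            omega
          simp [this]
        rw [Finset.sum_congr rfl hz]; simp
      · rw [if_neg hb]
        have halive : aliveB nums i j0 = true := by
          rw [aliveB_iff]
          intro k hk hk'
          rcases Nat.lt_or_ge k j0 with hc | hc
          · exact H k hk hc
          · have : k = j0 := by omega
            subst this; omega
        have H' : ∀ k, i < k → k < j0 + 1 → nums.getD i 0 ≤ nums.getD k 0 := by
          intro k hk hk'
          rcases Nat.lt_or_ge k j0 with hc | hc
          · exact H k hk hc
          · have : k = j0 := by omega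
            subst this; omega
        rw [ih (j0 + 1) (by omega) (by omega) H',
          sum_ite_split nums.length j0 (fun j => aliveB nums i j) hn halive]
        push_cast; ring
    · rw [if_neg hn]
      have hz : ∀ j ∈ Finset.range nums.length,
          (if j0 ≤ j ∧ aliveB nums i j = true then (1 : Int) else 0) = 0 := by
        intro j hj
        rw [Finset.mem_range] at hj
        have : ¬ (j0 ≤ j ∧ aliveB nums i j = true) := by rintro ⟨h1, _⟩; omega
        simp [this]
      rw [Finset.sum_congr rfl hz]; simp

theorem validSubarrays_eq_sum (nums : List Int) :
    validSubarrays nums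
      = ∑ i ∈ Finset.range nums.length, ∑ j ∈ Finset.range nums.length,
          (if i ≤ j ∧ aliveB nums i j = true then (1 : Int) else 0) := by
  unfold validSubarrays
  rw [foldl_add_range (fun i => (innerA nums i (i + 1) : Int) - (i : Int)) nums.length 0]
  rw [zero_add]
  apply Finset.sum_congr rfl
  intro i hi
  rw [Finset.mem_range] at hi
  have h1 := innerA_eq nums i (nums.length) (i + 1) (by omega) (by omega)
    (fun k hk hk' => by omega)
  have h2 := sum_ite_split nums.length i (fun j => aliveB nums i j) hi
    (aliveB_of_le nums i i le_rfl)
  simp only [h1, h2]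
  push_cast; ring

-- ===== B-side =====

theorem filter_length_sum (k : Nat) (p : Nat → Bool) :
    ((((List.range k).filter p).length : Int))
      = ∑ i ∈ Finset.range k, (if p i = true then (1 : Int) else 0) := by
  induction k with
  | zero => simp
  | succ k ih =>
    rw [List.range_succ, List.filter_append, Finset.sum_range_succ, ← ih]
    cases hp : p k <;> simp [hp]

theorem cnt_eq (nums : List Int) (j : Nat) (hj : j < nums.length) :
    ((((List.range (j + 1)).filter (fun i => aliveB nums i j)).length : Int))
      = ∑ i ∈ Finset.range nums.length,
          (if i ≤ j ∧ aliveB nums i j = true then (1 : Int) else 0) := by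
  rw [filter_length_sum]
  have hsub : Finset.range (j + 1) ⊆ Finset.range nums.length :=
    by
    intro x hx
    rw [Finset.mem_range] at *
    omega
  have hzero : ∀ i ∈ Finset.range nums.length, i ∉ Finset.range (j + 1) →
      (if i ≤ j ∧ aliveB nums i j = true then (1 : Int) else 0) = 0 := by
    intro i _ hi
    rw [Finset.mem_range] at hi
    have : ¬ (i ≤ j ∧ aliveB nums i j = true) := by rintro ⟨h1, _⟩; omega
    simp [this]
  rw [← Finset.sum_subset hsub hzero]
  apply Finset.sum_congr rfl
  intro i hi
  rw [Finset.mem_range] at hi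
  have : i ≤ j := by omega
  simp [this]

theorem pairwise_stack (nums : List Int) (m : Nat) :
    ((List.range m).filter (fun i => aliveB nums i (m - 1))).Pairwise
      (fun a b => nums.getD a 0 ≤ nums.getD b 0) := by
  have h1 : ((List.range m).filter (fun i => aliveB nums i (m - 1))).Pairwise (· < ·) :=
    (List.pairwise_lt_range).filter _
  refine h1.imp_of_mem ?_
  intro a b ha hb hab
  rw [List.mem_filter, List.mem_range] at ha hb
  have halive := (aliveB_iff nums a (m - 1)).mp ha.2
  exact halive b hab (by omega)

theorem popWhileB_filter (nums : List Int) (x : Int) (l : List Nat)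
    (hp : l.Pairwise (fun a b => nums.getD b 0 ≤ nums.getD a 0)) :
    popWhileB nums x l = l.filter (fun t => decide (nums.getD t 0 ≤ x)) := by
  induction l with
  | nil => rfl
  | cons t rest ih =>
    rw [List.pairwise_cons] at hp
    by_cases hx : x < nums.getD t 0
    · have hft : decide (nums.getD t 0 ≤ x) = false := by
        rw [decide_eq_false_iff_not]; omega
      rw [List.filter_cons, hft]
      simp only [popWhileB, if_pos hx, Bool.false_eq_true, if_false]
      exact ih hp.2
    · have hft : decide (nums.getD t 0 ≤ x) = true := by
        rw [decide_eq_true_eq]; omega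
      rw [List.filter_cons, hft]
      simp only [popWhileB, if_neg hx, if_true]
      congr 1
      symm
      rw [List.filter_eq_self]
      intro b hb
      rw [decide_eq_true_eq]
      have := hp.1 b hb
      omega

theorem foldB_eq (nums : List Int) :
    ∀ m, m ≤ nums.length →
    (List.range m).foldl
      (fun (st : Int × List Nat) j =>
        let s := j :: popWhileB nums (nums.getD j 0) st.2
        (st.1 + (s.length : Int), s))
      (0, [])
      = (∑ j ∈ Finset.range m, ∑ i ∈ Finset.range nums.length,
          (if i ≤ j ∧ aliveB nums i j = true then (1 : Int) else 0),
        ((List.range m).filter (fun i => aliveB nums i (m - 1))).reverse) := by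
  intro m
  induction m with
  | zero => simp
  | succ m ih =>
    intro hm
    rw [List.range_succ, List.foldl_append, ih (by omega), List.foldl_cons, List.foldl_nil]
    simp only []
    have hfilt : (List.range m).filter (fun i => aliveB nums i m)
        = ((List.range m).filter (fun i => aliveB nums i (m - 1))).filter
            (fun t => decide (nums.getD t 0 ≤ nums.getD m 0)) := by
      rw [List.filter_filter]
      apply List.filter_congr
      intro i hi
      rw [List.mem_range] at hi
      rw [aliveB_succ_of_lt nums i m hi, Bool.and_comm]
    have hpop : popWhileB nums (nums.getD m 0)
        (((List.range m).filter (fun i => aliveB nums i (m - 1))).reverse)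
        = ((List.range m).filter (fun i => aliveB nums i m)).reverse := by
      rw [popWhileB_filter nums _ _ (by
        rw [List.pairwise_reverse]
        exact pairwise_stack nums m)]
      rw [hfilt, List.filter_reverse]
    rw [Prod.mk.injEq]
    constructor
    · rw [Finset.sum_range_succ, hpop]
      have hlen : ((m :: ((List.range m).filter (fun i => aliveB nums i m)).reverse).length : Int)
          = (((List.range (m + 1)).filter (fun i => aliveB nums i m)).length : Int) := by
        rw [List.range_succ, List.filter_append]
        simp [aliveB_of_le nums m m le_rfl, add_comm]
      rw [hlen, cnt_eq nums m (by omega)]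
    · rw [hpop, List.filter_append, Nat.add_sub_cancel]
      simp [aliveB_of_le nums m m le_rfl]

-- ===== VERDICT (by name: the statement is the Claim_ definition above) =====
theorem validSubarrays_spec : Claim_equal_validSubarrays := by
  intro nums _
  unfold Spec_validSubarrays validSubarrays_alt
  rw [foldB_eq nums nums.length le_rfl]
  rw [validSubarrays_eq_sum, Finset.sum_comm]
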